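-- pv_equiv track=rewrite | github.com/MythicInfinity/tts-eval | src/tts_eval/ctc.py | decode_greedy
-- ===== SOURCE A (Python) =====
-- def decode_greedy(token_ids: list[int], labels: tuple[str, ...], blank_id: int = 0) -> str:
--     decoded: list[str] = []
--     previous: int | None = None
--     for token_id in token_ids:
--         if token_id == blank_id:
--             previous = None
--             continue
--         if token_id == previous:
--             continue
--         decoded.append(labels[token_id])
--         previous = token_id
--     return "".join(decoded).replace("|", " ")
-- ===== SOURCE B (Python) =====
-- def decode_greedy(token_ids: list[int], labels: tuple[str, ...], blank_id: int = 0) -> str: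
--     # Group-then-filter decomposition (itertools.groupby style, hand-rolled since A
--     # imports nothing): first collapse consecutive-equal tokens into their run keys
--     # (blank runs are kept as keys, so they break runs and A,blank,A yields two keys);
--     # then drop the blank keys, map through labels, join, and replace '|' by ' '.
--     keys: list[int] = []
--     for t in token_ids:
--         if not keys or keys[-1] != t:
--             keys.append(t)
--     return "".join(labels[k] for k in keys if k != blank_id).replace("|", " ")
-- ===== Notes on version B (the rewrite author's own statement) =====
-- stated objective: idiomatic
-- what changed: Replaces A's single-pass 'previous' state machine with a groupby-style staged decomposition: first compress the sequence into consecutive-run keys (blanks kept so they break runs), then filter out blank keys, map through labels and join.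
import Mathlib
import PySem

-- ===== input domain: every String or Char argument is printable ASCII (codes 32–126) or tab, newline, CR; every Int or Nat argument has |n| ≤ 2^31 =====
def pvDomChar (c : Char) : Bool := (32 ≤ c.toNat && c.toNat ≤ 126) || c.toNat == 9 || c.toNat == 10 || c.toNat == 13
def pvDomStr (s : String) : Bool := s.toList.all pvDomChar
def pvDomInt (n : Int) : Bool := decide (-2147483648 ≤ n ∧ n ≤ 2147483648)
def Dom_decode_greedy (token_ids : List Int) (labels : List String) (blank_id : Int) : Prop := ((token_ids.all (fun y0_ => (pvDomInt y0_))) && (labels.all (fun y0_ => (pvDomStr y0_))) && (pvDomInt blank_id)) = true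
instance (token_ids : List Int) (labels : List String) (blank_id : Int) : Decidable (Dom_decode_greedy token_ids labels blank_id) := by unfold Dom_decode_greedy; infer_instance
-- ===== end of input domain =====

-- B replaces A's 'previous' state machine by a groupby-style staged decomposition
-- (compress consecutive runs, then filter blanks, map, join); same cost, more idiomatic.

-- ===== PORT A =====
-- loop state: (decoded list so far, previous : Option Int); labels[token_id] via pyGetD (total under Pre_)
def decode_greedy (token_ids : List Int) (labels : List String) (blank_id : Int) : String :=
  PySem.Str.replace (PySem.Str.join ""
    (token_ids.foldl
      (fun (st : List String × Option Int) token_id =>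
        if token_id = blank_id then (st.1, none)
        else if some token_id = st.2 then st
        else (st.1 ++ [PySem.List.pyGetD labels token_id ""], some token_id))
      ([], none)).1) "|" " "

-- ===== PORT B =====
-- stage 1: run-key compression ('if not keys or keys[-1] != t: keys.append(t)');
-- stage 2: filter out blank keys, map through labels, join, replace.
def decode_greedy_alt (token_ids : List Int) (labels : List String) (blank_id : Int) : String :=
  let keys : List Int :=
    token_ids.foldl (fun ks t => if ks = [] ∨ ks.getLast? ≠ some t then ks ++ [t] else ks) []
  PySem.Str.replace (PySem.Str.join ""
    ((keys.filter (fun k => k ≠ blank_id)).map (fun k => PySem.List.pyGetD labels k ""))) "|" " "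

-- ===== PRECONDITION & SPEC =====
-- Pre_: every non-blank token is a valid (possibly negative) Python index into labels —
-- exactly the inputs where A's labels[token_id] never raises IndexError.
def Pre_decode_greedy (token_ids : List Int) (labels : List String) (blank_id : Int) : Prop :=
  ∀ t ∈ token_ids, t ≠ blank_id → PySem.Raise.InRange labels.length t
instance (token_ids : List Int) (labels : List String) (blank_id : Int) : Decidable (Pre_decode_greedy token_ids labels blank_id) := by unfold Pre_decode_greedy; infer_instance
def pvWitness_decode_greedy : List Int × List String × Int := ([1, 1, 0, 2, -1], ["-", "a", "b"], 0)

def Spec_decode_greedy (token_ids : List Int) (labels : List String) (blank_id : Int) (out : String) : Prop := out = decode_greedy_alt token_ids labels blank_id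
instance (token_ids : List Int) (labels : List String) (blank_id : Int) (out : String) : Decidable (Spec_decode_greedy token_ids labels blank_id out) := by unfold Spec_decode_greedy; infer_instance

-- ===== CLAIM (what is proved, stated in full; the proofs are below) =====
def Claim_equal_decode_greedy : Prop := ∀ (token_ids : List Int) (labels : List String) (blank_id : Int), Dom_decode_greedy token_ids labels blank_id → Pre_decode_greedy token_ids labels blank_id → Spec_decode_greedy token_ids labels blank_id (decode_greedy token_ids labels blank_id)

-- ===== LEMMAS AND PROOFS =====

-- the run keys of ts given the raw predecessor p (none at the start)
def pvRuns (p : Option Int) : List Int → List Int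
  | [] => []
  | c :: ts => if some c = p then pvRuns p ts else c :: pvRuns (some c) ts

-- B's stage-1 fold computes pvRuns
theorem pvFoldB (ts : List Int) (ks : List Int) :
    ts.foldl (fun ks t => if ks = [] ∨ ks.getLast? ≠ some t then ks ++ [t] else ks) ks
      = ks ++ pvRuns ks.getLast? ts := by
  induction ts generalizing ks with
  | nil => simp [pvRuns]
  | cons c ts ih =>
    simp only [List.foldl_cons, pvRuns]
    by_cases h : some c = ks.getLast?
    · have hne : ¬ (ks = [] ∨ ks.getLast? ≠ some c) := by
        rcases ks with _ | _
        · simp at h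
        · simp [h.symm]
      rw [if_neg hne, if_pos h, ih]
    · have hc : ks = [] ∨ ks.getLast? ≠ some c := Or.inr (fun hh => h hh.symm)
      rw [if_pos hc, if_neg h, ih]
      simp

-- the 'previous' A carries, expressed from the raw predecessor
def pvPrev (blank_id : Int) : Option Int → Option Int
  | none => none
  | some c => if c = blank_id then none else some c

-- A's fold emits exactly the non-blank run keys, mapped through labels
theorem pvFoldA (blank_id : Int) (labels : List String) (ts : List Int)
    (acc : List String) (p q : Option Int) (hq : q = pvPrev blank_id p) :
    (ts.foldl
      (fun (st : List String × Option Int) token_id =>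
        if token_id = blank_id then (st.1, none)
        else if some token_id = st.2 then st
        else (st.1 ++ [PySem.List.pyGetD labels token_id ""], some token_id))
      (acc, q)).1
      = acc ++ ((pvRuns p ts).filter (fun k => k ≠ blank_id)).map
          (fun k => PySem.List.pyGetD labels k "") := by
  induction ts generalizing acc p q with
  | nil => simp [pvRuns]
  | cons c ts ih =>
    simp only [List.foldl_cons, pvRuns]
    by_cases h1 : c = blank_id
    · subst h1
      rw [if_pos rfl]
      by_cases h2 : some c = p
      · rw [if_pos h2, ih _ p none (by rw [← h2]; simp [pvPrev])]
      · rw [if_neg h2, ih _ (some c) none (by simp [pvPrev])]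
        simp
    · by_cases h2 : some c = p
      · -- repeated non-blank token: previous = some c
        have hp : q = some c := by rw [hq, ← h2]; simp [pvPrev, h1]
        rw [if_neg h1, hp, if_pos rfl, ih _ p (some c) (by rw [← hp, hq]), if_pos h2]
      · have hne : some c ≠ q := by
          rw [hq]
          cases p with
          | none => simp [pvPrev]
          | some d =>
            simp only [pvPrev]
            split_ifs with hd
            · simp
            · simpa using fun hcd => h2 (by rw [hcd])
        rw [if_neg h1, if_neg hne, if_neg h2,
            ih _ (some c) (some c) (by simp [pvPrev, h1])]
        simp [h1]

-- ===== VERDICT (by name: the statement is the Claim_ definition above) =====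
theorem decode_greedy_spec : Claim_equal_decode_greedy := by
  intro token_ids labels blank_id _ _
  show decode_greedy token_ids labels blank_id = decode_greedy_alt token_ids labels blank_id
  unfold decode_greedy decode_greedy_alt
  rw [pvFoldA blank_id labels token_ids [] none none (by simp [pvPrev]),
      pvFoldB token_ids []]
  simp
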